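-- pv_equiv track=rewrite | github.com/thesooraj/HIT137 | assignment2_QS1.py | decrypt_logic
-- ===== SOURCE A (Python) =====
-- def decrypt_logic(text, s1, s2):
--     result = ""
--     for char in text:
--         if char.islower():
--             if 'a' <= char <= 'm':
--                 shift = s1 * s2
--                 # Move backward for decryption
--                 new_pos = (ord(char) - 97 - shift) % 26
--                 result += chr(new_pos + 97)
--             else:
--                 shift = s1 + s2
--                 # Move forward (reverse of backward)
--                 new_pos = (ord(char) - 97 + shift) % 26
--                 result += chr(new_pos + 97)
--
--         elif char.isupper():
--             if 'A' <= char <= 'M':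
--                 shift = s1
--                 new_pos = (ord(char) - 65 + shift) % 26
--                 result += chr(new_pos + 65)
--             else:
--                 shift = s2 * s2
--                 new_pos = (ord(char) - 65 - shift) % 26
--                 result += chr(new_pos + 65)
--         else:
--             result += char
--     return result
-- ===== SOURCE B (Python) =====
-- def decrypt_logic(text, s1, s2):
--     lo = "abcdefghijklmnopqrstuvwxyz"
--     up = "ABCDEFGHIJKLMNOPQRSTUVWXYZ"
--     table = {}
--     for i, c in enumerate(lo):
--         table[c] = lo[(i - s1 * s2) % 26 if i < 13 else (i + s1 + s2) % 26]
--     for i, c in enumerate(up):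
--         table[c] = up[(i + s1) % 26 if i < 13 else (i - s2 * s2) % 26]
--     return "".join(table.get(c, c) for c in text)
-- ===== Notes on version B (the rewrite author's own statement) =====
-- stated objective: idiomatic
-- what changed: B precomputes a 52-entry translation table (source letter -> decrypted letter) once per call and then does one table-driven join pass over the text, instead of A's per-character branch-and-shift arithmetic with repeated string concatenation.
import Mathlib
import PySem

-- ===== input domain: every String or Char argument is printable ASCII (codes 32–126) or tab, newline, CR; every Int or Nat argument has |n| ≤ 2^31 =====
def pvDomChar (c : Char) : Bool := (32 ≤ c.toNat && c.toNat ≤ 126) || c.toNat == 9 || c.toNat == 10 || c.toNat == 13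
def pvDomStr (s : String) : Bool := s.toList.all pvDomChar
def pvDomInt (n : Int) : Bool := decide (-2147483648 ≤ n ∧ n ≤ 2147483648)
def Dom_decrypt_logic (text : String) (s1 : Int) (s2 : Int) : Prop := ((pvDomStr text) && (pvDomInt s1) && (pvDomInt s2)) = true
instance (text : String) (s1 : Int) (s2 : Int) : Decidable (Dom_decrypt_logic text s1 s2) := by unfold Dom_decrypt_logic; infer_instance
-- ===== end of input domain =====

-- B replaces A's per-character shift arithmetic by a 52-entry translation table built once
-- (dict from source letter to decrypted letter), then a single table-driven join pass;
-- objective: idiomatic (translate-table style); a timing run measured B faster by a constant factor.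

-- ===== PORT A =====
def decrypt_logic (text : String) (s1 : Int) (s2 : Int) : String :=
  String.ofList (text.toList.foldl (fun result char =>
    if PySem.Chars.islower char then
      if 'a' ≤ char ∧ char ≤ 'm' then
        result ++ [Char.ofNat ((PySem.Int.mod ((char.toNat : Int) - 97 - s1 * s2) 26) + 97).toNat]
      else
        result ++ [Char.ofNat ((PySem.Int.mod ((char.toNat : Int) - 97 + (s1 + s2)) 26) + 97).toNat]
    else if PySem.Chars.isupper char then
      if 'A' ≤ char ∧ char ≤ 'M' then
        result ++ [Char.ofNat ((PySem.Int.mod ((char.toNat : Int) - 65 + s1) 26) + 65).toNat]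
      else
        result ++ [Char.ofNat ((PySem.Int.mod ((char.toNat : Int) - 65 - s2 * s2) 26) + 65).toNat]
    else
      result ++ [char]) [])

-- ===== PORT B =====
def decrypt_logic_alt (text : String) (s1 : Int) (s2 : Int) : String :=
  let lo := "abcdefghijklmnopqrstuvwxyz".toList
  let up := "ABCDEFGHIJKLMNOPQRSTUVWXYZ".toList
  let table : PySem.Dict Char Char :=
    (PySem.List.enumerate lo).foldl (fun d p =>
      d.insert p.2 (PySem.List.pyGetD lo
        (if p.1 < 13 then PySem.Int.mod (p.1 - s1 * s2) 26 else PySem.Int.mod (p.1 + s1 + s2) 26) ' '))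
      PySem.Dict.empty
  let table :=
    (PySem.List.enumerate up).foldl (fun d p =>
      d.insert p.2 (PySem.List.pyGetD up
        (if p.1 < 13 then PySem.Int.mod (p.1 + s1) 26 else PySem.Int.mod (p.1 - s2 * s2) 26) ' '))
      table
  String.ofList (text.toList.map (fun c => table.getD c c))

-- ===== PRECONDITION & SPEC =====
def Spec_decrypt_logic (text : String) (s1 : Int) (s2 : Int) (out : String) : Prop := out = decrypt_logic_alt text s1 s2
instance (text : String) (s1 : Int) (s2 : Int) (out : String) : Decidable (Spec_decrypt_logic text s1 s2 out) := by unfold Spec_decrypt_logic; infer_instance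

-- ===== CLAIM (what is proved, stated in full; the proofs are below) =====
def Claim_equal_decrypt_logic : Prop := ∀ (text : String) (s1 : Int) (s2 : Int), Dom_decrypt_logic text s1 s2 → Spec_decrypt_logic text s1 s2 (decrypt_logic text s1 s2)

-- ===== LEMMAS AND PROOFS =====

-- A's per-character transformation, factored out of its loop body
def pvFA (s1 s2 : Int) (c : Char) : Char :=
  if PySem.Chars.islower c then
    if 'a' ≤ c ∧ c ≤ 'm' then
      Char.ofNat ((PySem.Int.mod ((c.toNat : Int) - 97 - s1 * s2) 26) + 97).toNat
    else
      Char.ofNat ((PySem.Int.mod ((c.toNat : Int) - 97 + (s1 + s2)) 26) + 97).toNat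
  else if PySem.Chars.isupper c then
    if 'A' ≤ c ∧ c ≤ 'M' then
      Char.ofNat ((PySem.Int.mod ((c.toNat : Int) - 65 + s1) 26) + 65).toNat
    else
      Char.ofNat ((PySem.Int.mod ((c.toNat : Int) - 65 - s2 * s2) 26) + 65).toNat
  else c

def pvLo : List Char := "abcdefghijklmnopqrstuvwxyz".toList
def pvUp : List Char := "ABCDEFGHIJKLMNOPQRSTUVWXYZ".toList

-- B's translation table, factored out of its definition
def pvTbl1 (s1 s2 : Int) : PySem.Dict Char Char :=
  (PySem.List.enumerate pvLo).foldl (fun d p =>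
      d.insert p.2 (PySem.List.pyGetD pvLo
        (if p.1 < 13 then PySem.Int.mod (p.1 - s1 * s2) 26 else PySem.Int.mod (p.1 + s1 + s2) 26) ' '))
    PySem.Dict.empty

def pvTbl (s1 s2 : Int) : PySem.Dict Char Char :=
  (PySem.List.enumerate pvUp).foldl (fun d p =>
      d.insert p.2 (PySem.List.pyGetD pvUp
        (if p.1 < 13 then PySem.Int.mod (p.1 + s1) 26 else PySem.Int.mod (p.1 - s2 * s2) 26) ' '))
    (pvTbl1 s1 s2)

lemma pvAlt_eq (text : String) (s1 s2 : Int) :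
    decrypt_logic_alt text s1 s2 = String.ofList (text.toList.map (fun c => (pvTbl s1 s2).getD c c)) := rfl

lemma pvA_eq (text : String) (s1 s2 : Int) :
    decrypt_logic text s1 s2 = String.ofList (text.toList.map (pvFA s1 s2)) := by
  unfold decrypt_logic
  have h : (fun (result : List Char) (char : Char) =>
      if PySem.Chars.islower char then
        if 'a' ≤ char ∧ char ≤ 'm' then
          result ++ [Char.ofNat ((PySem.Int.mod ((char.toNat : Int) - 97 - s1 * s2) 26) + 97).toNat]
        else
          result ++ [Char.ofNat ((PySem.Int.mod ((char.toNat : Int) - 97 + (s1 + s2)) 26) + 97).toNat]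
      else if PySem.Chars.isupper char then
        if 'A' ≤ char ∧ char ≤ 'M' then
          result ++ [Char.ofNat ((PySem.Int.mod ((char.toNat : Int) - 65 + s1) 26) + 65).toNat]
        else
          result ++ [Char.ofNat ((PySem.Int.mod ((char.toNat : Int) - 65 - s2 * s2) 26) + 65).toNat]
      else
        result ++ [char]) = (fun result char => result ++ [pvFA s1 s2 char]) := by
    funext r c; unfold pvFA; split_ifs <;> rfl
  rw [h, PySem.List.foldl_append_singleton_eq_map, List.nil_append]

lemma pvCharLe (a b : Char) : (a ≤ b) ↔ a.toNat ≤ b.toNat := by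
  rw [Char.le_def, UInt32.le_iff_toNat_le]; rfl

lemma pvLoNth (k : Nat) (h : k < 26) : pvLo[k]? = some (Char.ofNat (97 + k)) := by
  interval_cases k <;> decide

lemma pvLoGetD (j : Int) (h0 : 0 ≤ j) (h1 : j < 26) :
    PySem.List.pyGetD pvLo j ' ' = Char.ofNat (97 + j.toNat) := by
  rw [PySem.List.pyGetD_eq_getElem pvLo ' ' h0 (by rw [show pvLo.length = 26 from by decide]; omega)]
  have h2 := pvLoNth j.toNat (by omega)
  have hlen : j.toNat < pvLo.length := by rw [show pvLo.length = 26 from by decide]; omega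
  rw [List.getElem?_eq_getElem hlen, Option.some_inj] at h2
  exact h2

lemma pvUpNth (k : Nat) (h : k < 26) : pvUp[k]? = some (Char.ofNat (65 + k)) := by
  interval_cases k <;> decide

lemma pvUpGetD (j : Int) (h0 : 0 ≤ j) (h1 : j < 26) :
    PySem.List.pyGetD pvUp j ' ' = Char.ofNat (65 + j.toNat) := by
  rw [PySem.List.pyGetD_eq_getElem pvUp ' ' h0 (by rw [show pvUp.length = 26 from by decide]; omega)]
  have h2 := pvUpNth j.toNat (by omega)
  have hlen : j.toNat < pvUp.length := by rw [show pvUp.length = 26 from by decide]; omega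
  rw [List.getElem?_eq_getElem hlen, Option.some_inj] at h2
  exact h2

lemma pvLoToNat : pvLo.map Char.toNat = [97, 98, 99, 100, 101, 102, 103, 104, 105, 106, 107, 108, 109, 110, 111, 112, 113, 114, 115, 116, 117, 118, 119, 120, 121, 122] := by rfl

lemma pvUpToNat : pvUp.map Char.toNat = [65, 66, 67, 68, 69, 70, 71, 72, 73, 74, 75, 76, 77, 78, 79, 80, 81, 82, 83, 84, 85, 86, 87, 88, 89, 90] := by rfl

lemma pvLoNodup : pvLo.Nodup := List.Nodup.of_map Char.toNat (by rw [pvLoToNat]; decide)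

lemma pvUpNodup : pvUp.Nodup := List.Nodup.of_map Char.toNat (by rw [pvUpToNat]; decide)

lemma pvUpNotLo : ∀ c ∈ pvUp, c ∉ pvLo := by
  have h : (pvUp.all (fun c => !(pvLo.contains c))) = true := by rfl
  rw [List.all_eq_true] at h
  intro c hc
  simpa using h c hc

lemma pvLoNotUp : ∀ c ∈ pvLo, c ∉ pvUp := by
  have h : (pvLo.all (fun c => !(pvUp.contains c))) = true := by rfl
  rw [List.all_eq_true] at h
  intro c hc
  simpa using h c hc

lemma pvMemRange : ∀ c ∈ pvLo ++ pvUp, (97 ≤ c.toNat ∧ c.toNat ≤ 122) ∨ (65 ≤ c.toNat ∧ c.toNat ≤ 90) := by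
  have h : ((pvLo ++ pvUp).all
      (fun c => decide ((97 ≤ c.toNat ∧ c.toNat ≤ 122) ∨ (65 ≤ c.toNat ∧ c.toNat ≤ 90)))) = true := by rfl
  rw [List.all_eq_true] at h
  intro c hc
  simpa using h c hc

lemma pvKeysNodupApp : (pvLo ++ pvUp).Nodup :=
  List.nodup_append.mpr ⟨pvLoNodup, pvUpNodup, fun a ha _ hb he => pvLoNotUp a ha (he ▸ hb)⟩

lemma pvKeys1 (s1 s2 : Int) : (pvTbl1 s1 s2).keys = pvLo := by
  unfold pvTbl1
  rw [PySem.Dict.keys_foldl_insert_key, PySem.List.map_snd_enumerate, PySem.Dict.keys_empty,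
      PySem.Set.update_nil_left, PySem.Set.ofList_eq_self_of_nodup _ pvLoNodup]

lemma pvItems1 (s1 s2 : Int) : (pvTbl1 s1 s2).items =
    (PySem.List.enumerate pvLo).map (fun p => (p.2, PySem.List.pyGetD pvLo
        (if p.1 < 13 then PySem.Int.mod (p.1 - s1 * s2) 26 else PySem.Int.mod (p.1 + s1 + s2) 26) ' ')) := by
  unfold pvTbl1
  rw [PySem.Dict.items_foldl_insert_fresh _ _ _ _
      (fun a _ => PySem.Dict.contains_empty _)
      (by rw [PySem.List.map_snd_enumerate]; exact pvLoNodup)]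
  rfl

lemma pvFresh2 (s1 s2 : Int) : ∀ a ∈ PySem.List.enumerate pvUp, (pvTbl1 s1 s2).contains a.2 = false := by
  intro a ha
  rw [PySem.Dict.contains_eq_decide_mem_keys, pvKeys1, decide_eq_false_iff_not]
  have h2 : a.2 ∈ pvUp := by
    rw [← PySem.List.map_snd_enumerate pvUp 0]
    exact List.mem_map_of_mem ha
  exact pvUpNotLo a.2 h2

lemma pvTblItems (s1 s2 : Int) : (pvTbl s1 s2).items =
    (PySem.List.enumerate pvLo).map (fun p => (p.2, PySem.List.pyGetD pvLo
        (if p.1 < 13 then PySem.Int.mod (p.1 - s1 * s2) 26 else PySem.Int.mod (p.1 + s1 + s2) 26) ' '))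
    ++ (PySem.List.enumerate pvUp).map (fun p => (p.2, PySem.List.pyGetD pvUp
        (if p.1 < 13 then PySem.Int.mod (p.1 + s1) 26 else PySem.Int.mod (p.1 - s2 * s2) 26) ' ')) := by
  unfold pvTbl
  rw [PySem.Dict.items_foldl_insert_fresh _ _ _ _ (pvFresh2 s1 s2)
      (by rw [PySem.List.map_snd_enumerate]; exact pvUpNodup), pvItems1]

lemma pvKeys (s1 s2 : Int) : (pvTbl s1 s2).keys = pvLo ++ pvUp := by
  unfold pvTbl
  rw [PySem.Dict.keys_foldl_insert_key, PySem.List.map_snd_enumerate, pvKeys1]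
  exact PySem.Set.update_eq_append_of_disjoint _ _ pvUpNodup pvUpNotLo

lemma pvTblKeysNodup (s1 s2 : Int) : (pvTbl s1 s2).keys.Nodup := by
  rw [pvKeys]; exact pvKeysNodupApp

lemma pvIslowerT (c : Char) (h : 97 ≤ c.toNat ∧ c.toNat ≤ 122) : PySem.Chars.islower c = true := by
  simp only [PySem.Chars.islower, Bool.and_eq_true, decide_eq_true_eq]
  exact ⟨(pvCharLe _ _).mpr h.1, (pvCharLe _ _).mpr h.2⟩

lemma pvIslowerF (c : Char) (h : ¬(97 ≤ c.toNat ∧ c.toNat ≤ 122)) : PySem.Chars.islower c = false := by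
  cases hT : PySem.Chars.islower c
  · rfl
  · exfalso
    simp only [PySem.Chars.islower, Bool.and_eq_true, decide_eq_true_eq] at hT
    exact h ⟨(pvCharLe _ _).mp hT.1, (pvCharLe _ _).mp hT.2⟩

lemma pvIsupperT (c : Char) (h : 65 ≤ c.toNat ∧ c.toNat ≤ 90) : PySem.Chars.isupper c = true := by
  simp only [PySem.Chars.isupper, Bool.and_eq_true, decide_eq_true_eq]
  exact ⟨(pvCharLe _ _).mpr h.1, (pvCharLe _ _).mpr h.2⟩

lemma pvIsupperF (c : Char) (h : ¬(65 ≤ c.toNat ∧ c.toNat ≤ 90)) : PySem.Chars.isupper c = false := by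
  cases hT : PySem.Chars.isupper c
  · rfl
  · exfalso
    simp only [PySem.Chars.isupper, Bool.and_eq_true, decide_eq_true_eq] at hT
    exact h ⟨(pvCharLe _ _).mp hT.1, (pvCharLe _ _).mp hT.2⟩

lemma pvLookupLo (s1 s2 : Int) (c : Char) (h1 : 97 ≤ c.toNat) (h2 : c.toNat ≤ 122) :
    (pvTbl s1 s2).getD c c = PySem.List.pyGetD pvLo
      (if ((c.toNat : Int) - 97) < 13 then PySem.Int.mod (((c.toNat : Int) - 97) - s1 * s2) 26
       else PySem.Int.mod (((c.toNat : Int) - 97) + s1 + s2) 26) ' ' := by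
  have hk : c.toNat - 97 < 26 := by omega
  have hklen : c.toNat - 97 < pvLo.length := by rw [show pvLo.length = 26 from by decide]; omega
  have hc : pvLo[c.toNat - 97] = c := by
    have h3 := pvLoNth (c.toNat - 97) hk
    rw [List.getElem?_eq_getElem hklen, Option.some_inj] at h3
    rw [h3, show 97 + (c.toNat - 97) = c.toNat by omega, Char.ofNat_toNat]
  have hcast : ((c.toNat - 97 : Nat) : Int) = (c.toNat : Int) - 97 := by omega
  apply PySem.Dict.getD_of_mem_items _ _ (pvTblKeysNodup s1 s2)
  rw [pvTblItems]
  refine List.mem_append_left _ (List.mem_map.mpr ⟨(((c.toNat - 97 : Nat) : Int), pvLo[c.toNat - 97]), ?_, ?_⟩)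
  · exact (PySem.List.mem_enumerate_iff _ _ _).mpr ⟨c.toNat - 97, hklen, by rw [zero_add]⟩
  · rw [hc, hcast]

lemma pvLookupUp (s1 s2 : Int) (c : Char) (h1 : 65 ≤ c.toNat) (h2 : c.toNat ≤ 90) :
    (pvTbl s1 s2).getD c c = PySem.List.pyGetD pvUp
      (if ((c.toNat : Int) - 65) < 13 then PySem.Int.mod (((c.toNat : Int) - 65) + s1) 26
       else PySem.Int.mod (((c.toNat : Int) - 65) - s2 * s2) 26) ' ' := by
  have hk : c.toNat - 65 < 26 := by omega
  have hklen : c.toNat - 65 < pvUp.length := by rw [show pvUp.length = 26 from by decide]; omega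
  have hc : pvUp[c.toNat - 65] = c := by
    have h3 := pvUpNth (c.toNat - 65) hk
    rw [List.getElem?_eq_getElem hklen, Option.some_inj] at h3
    rw [h3, show 65 + (c.toNat - 65) = c.toNat by omega, Char.ofNat_toNat]
  have hcast : ((c.toNat - 65 : Nat) : Int) = (c.toNat : Int) - 65 := by omega
  apply PySem.Dict.getD_of_mem_items _ _ (pvTblKeysNodup s1 s2)
  rw [pvTblItems]
  refine List.mem_append_right _ (List.mem_map.mpr ⟨(((c.toNat - 65 : Nat) : Int), pvUp[c.toNat - 65]), ?_, ?_⟩)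
  · exact (PySem.List.mem_enumerate_iff _ _ _).mpr ⟨c.toNat - 65, hklen, by rw [zero_add]⟩
  · rw [hc, hcast]

lemma pvLookupOther (s1 s2 : Int) (c : Char) (h1 : ¬(97 ≤ c.toNat ∧ c.toNat ≤ 122))
    (h2 : ¬(65 ≤ c.toNat ∧ c.toNat ≤ 90)) : (pvTbl s1 s2).getD c c = c := by
  apply PySem.Dict.getD_of_not_contains
  rw [PySem.Dict.contains_eq_decide_mem_keys, pvKeys, decide_eq_false_iff_not]
  intro hmem
  rcases pvMemRange c hmem with h | h
  · exact h1 h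
  · exact h2 h

lemma pvPoint (s1 s2 : Int) (c : Char) :
    pvFA s1 s2 c = (pvTbl s1 s2).getD c c := by
  unfold pvFA
  by_cases hl : 97 ≤ c.toNat ∧ c.toNat ≤ 122
  · rw [pvLookupLo s1 s2 c hl.1 hl.2, if_pos (pvIslowerT c hl)]
    by_cases hm : c.toNat ≤ 109
    · rw [if_pos ⟨(pvCharLe 'a' c).mpr hl.1, (pvCharLe c 'm').mpr hm⟩,
          if_pos (show ((c.toNat : Int) - 97) < 13 by omega),
          pvLoGetD _ (PySem.Int.mod_nonneg _ (by norm_num)) (PySem.Int.mod_lt _ (by norm_num))]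
      congr 1
      have := PySem.Int.mod_nonneg ((c.toNat : Int) - 97 - s1 * s2) (show (0:Int) < 26 by norm_num)
      omega
    · rw [if_neg (fun h => hm ((pvCharLe c 'm').mp h.2)),
          if_neg (show ¬(((c.toNat : Int) - 97) < 13) by omega),
          pvLoGetD _ (PySem.Int.mod_nonneg _ (by norm_num)) (PySem.Int.mod_lt _ (by norm_num))]
      rw [show (c.toNat : Int) - 97 + (s1 + s2) = (c.toNat : Int) - 97 + s1 + s2 by ring]
      congr 1
      have := PySem.Int.mod_nonneg ((c.toNat : Int) - 97 + s1 + s2) (show (0:Int) < 26 by norm_num)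
      omega
  · have hlF : ¬(PySem.Chars.islower c = true) := by rw [pvIslowerF c hl]; simp
    by_cases hu : 65 ≤ c.toNat ∧ c.toNat ≤ 90
    · rw [pvLookupUp s1 s2 c hu.1 hu.2, if_neg hlF, if_pos (pvIsupperT c hu)]
      by_cases hm : c.toNat ≤ 77
      · rw [if_pos ⟨(pvCharLe 'A' c).mpr hu.1, (pvCharLe c 'M').mpr hm⟩,
            if_pos (show ((c.toNat : Int) - 65) < 13 by omega),
            pvUpGetD _ (PySem.Int.mod_nonneg _ (by norm_num)) (PySem.Int.mod_lt _ (by norm_num))]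
        congr 1
        have := PySem.Int.mod_nonneg ((c.toNat : Int) - 65 + s1) (show (0:Int) < 26 by norm_num)
        omega
      · rw [if_neg (fun h => hm ((pvCharLe c 'M').mp h.2)),
            if_neg (show ¬(((c.toNat : Int) - 65) < 13) by omega),
            pvUpGetD _ (PySem.Int.mod_nonneg _ (by norm_num)) (PySem.Int.mod_lt _ (by norm_num))]
        congr 1
        have := PySem.Int.mod_nonneg ((c.toNat : Int) - 65 - s2 * s2) (show (0:Int) < 26 by norm_num)
        omega
    · have huF : ¬(PySem.Chars.isupper c = true) := by rw [pvIsupperF c hu]; simp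
      rw [pvLookupOther s1 s2 c hl hu, if_neg hlF, if_neg huF]

-- ===== VERDICT (by name: the statement is the Claim_ definition above) =====
theorem decrypt_logic_spec : Claim_equal_decrypt_logic := by
  intro text s1 s2 _
  unfold Spec_decrypt_logic
  rw [pvA_eq, pvAlt_eq]
  exact congrArg String.ofList (List.map_congr_left (fun c _ => pvPoint s1 s2 c))
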